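-- pv_equiv track=rewrite | github.com/radhika-singh-10/DailyDSAPractice | 2209-number-of-equal-count-substrings/2209-number-of-equal-count-substrings.py | equalCountSubstrings
-- ===== SOURCE A (Python) =====
-- from collections import Counter
--
-- def equalCountSubstrings(s: str, count: int) -> int:
--     n = len(s)
--     if n < count:
--         return 0
--     res = 0
--
--     for i in range(1, 27):
--         freq = Counter()
--         unique = 0
--         l = 0
--         for r in range(n):
--             freq[s[r]] += 1
--             if freq[s[r]] == count:
--                 unique += 1
--             if r - l + 1 > i * count:
--                 if freq[s[l]] == count:
--                     unique -= 1
--                 freq[s[l]] -= 1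
--                 l += 1
--             if r - l + 1 == i * count and unique == i:
--                 res += 1
--     return res
-- ===== SOURCE B (Python) =====
-- from collections import Counter
--
-- def equalCountSubstrings(s: str, count: int) -> int:
--     n = len(s)
--     res = 0
--     for i in range(1, 27):
--         L = i * count
--         if L < 1 or L > n:
--             continue
--         for start in range(n - L + 1):
--             c = Counter(s[start:start + L])
--             if len(c) == i and all(v == count for v in c.values()):
--                 res += 1
--     return res
-- ===== Notes on version B (the rewrite author's own statement) =====
-- stated objective: alternative
-- what changed: Replaced A's incremental sliding window (left pointer, persistent Counter and a maintained `unique` counter) by, for each i, sliding a fixed-length window L=i*count and recounting each window from scratch with a fresh Counter, testing len==i and all values==count.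
import Mathlib
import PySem

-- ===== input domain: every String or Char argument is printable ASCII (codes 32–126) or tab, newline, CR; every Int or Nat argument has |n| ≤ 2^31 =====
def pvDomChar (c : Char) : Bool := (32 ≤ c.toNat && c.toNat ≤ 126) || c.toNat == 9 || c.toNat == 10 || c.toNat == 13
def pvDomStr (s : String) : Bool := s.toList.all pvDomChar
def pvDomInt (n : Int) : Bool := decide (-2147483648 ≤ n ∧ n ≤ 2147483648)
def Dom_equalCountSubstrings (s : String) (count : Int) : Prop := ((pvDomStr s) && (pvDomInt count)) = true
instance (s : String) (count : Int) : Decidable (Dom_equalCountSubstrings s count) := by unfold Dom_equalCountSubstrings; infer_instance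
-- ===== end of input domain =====

-- B re-implements the count: for each i it slides a FIXED window of length i*count and recounts each
-- window with a fresh Counter (simpler per-window check), instead of A's incremental left-pointer /
-- `unique` maintenance; objective: alternative (no speed claim).


-- ===== PORT A =====
-- one pass of A's inner `for r in range(n)` loop; state = (freq, unique, l, res)
def pvStepA (cs : List Char) (count i : Int)
    (st : PySem.Dict Char Int × Int × Nat × Int) (r : Nat) :
    PySem.Dict Char Int × Int × Nat × Int :=
  let freq := st.1
  let unique := st.2.1
  let l := st.2.2.1
  let res := st.2.2.2
  let cr := cs.getD r ' '                                  -- s[r] (always in range here)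
  let freq := freq.modify cr 0 (· + 1)                     -- freq[s[r]] += 1
  let unique := if freq.getD cr 0 = count then unique + 1 else unique
  let p :=
    if ((r : Int) - (l : Int) + 1) > i * count then
      let cl := cs.getD l ' '                              -- s[l] (always in range here)
      let unique := if freq.getD cl 0 = count then unique - 1 else unique
      (freq.modify cl 0 (· - 1), unique, l + 1)
    else (freq, unique, l)
  let res := if ((r : Int) - (p.2.2 : Int) + 1) = i * count ∧ p.2.1 = i then res + 1 else res
  (p.1, p.2.1, p.2.2, res)

def equalCountSubstrings (s : String) (count : Int) : Int :=
  let cs := s.toList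
  let n := cs.length
  if (n : Int) < count then 0
  else
    (PySem.List.pyRange 1 27 1).foldl (fun res i =>
      ((List.range n).foldl (pvStepA cs count i) (PySem.Dict.empty, 0, 0, res)).2.2.2) 0

-- ===== PORT B =====
-- `c = Counter(window); len(c) == i and all(v == count for v in c.values())`
def pvWindowOK (w : List Char) (count i : Int) : Bool :=
  let c := PySem.Dict.counter w
  (c.size : Int) == i && c.values.all (fun v => v == count)

-- body of B's `for i in range(1, 27)` loop
def pvStepB (cs : List Char) (count res i : Int) : Int :=
  let L := i * count
  if L < 1 ∨ (cs.length : Int) < L then res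
  else
    (List.range (cs.length - L.toNat + 1)).foldl (fun res start =>
      if pvWindowOK (PySem.List.slice cs (some (start : Int)) (some ((start : Int) + L))) count i
      then res + 1 else res) res

def equalCountSubstrings_alt (s : String) (count : Int) : Int :=
  let cs := s.toList
  (PySem.List.pyRange 1 27 1).foldl (pvStepB cs count) 0

-- ===== PRECONDITION & SPEC =====
def Spec_equalCountSubstrings (s : String) (count : Int) (out : Int) : Prop := out = equalCountSubstrings_alt s count
instance (s : String) (count : Int) (out : Int) : Decidable (Spec_equalCountSubstrings s count out) := by unfold Spec_equalCountSubstrings; infer_instance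

-- ===== CLAIM (what is proved, stated in full; the proofs are below) =====
def Claim_equal_equalCountSubstrings : Prop := ∀ (s : String) (count : Int), Dom_equalCountSubstrings s count → Spec_equalCountSubstrings s count (equalCountSubstrings s count)

-- ===== LEMMAS AND PROOFS =====


-- the window [m-Lt, m) of the first m characters (Lt = i*count as a Nat)
def pvWin (cs : List Char) (Lt m : Nat) : List Char := (cs.take m).drop (m - Lt)

-- number of distinct chars whose multiplicity in w has reached `count` (A's `unique`)
def pvU (count : Int) (w : List Char) : Nat :=
  (w.toFinset.filter (fun c => count ≤ (w.count c : Int))).card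

-- A registers a hit at step r iff the window is full and unique = i
def pvHit (cs : List Char) (count i : Int) (Lt : Nat) (r : Nat) : Bool :=
  decide (Lt ≤ r + 1) && decide ((pvU count (pvWin cs Lt (r + 1)) : Int) = i)

lemma card_split (s : Finset Char) (a : Char) : s.card = (s.erase a).card + if a ∈ s then 1 else 0 := by
  split_ifs with h
  · have h1 := Finset.card_erase_of_mem h
    have h2 := Finset.card_pos.mpr ⟨a, h⟩
    omega
  · rw [Finset.erase_eq_of_notMem h]; omega

lemma pvU_append (count : Int) (hc : 1 ≤ count) (w : List Char) (c : Char) :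
    pvU count (w ++ [c]) = pvU count w + (if (w.count c : Int) + 1 = count then 1 else 0) := by
  classical
  unfold pvU
  have hsub : ∀ d : Char, count ≤ (w.count d : Int) → d ∈ w.toFinset := by
    intro d hd
    have : 0 < w.count d := by exact_mod_cast lt_of_lt_of_le (by omega : (0:Int) < count) hd
    simpa [List.mem_toFinset] using List.count_pos_iff.mp this
  have hT : (w ++ [c]).toFinset = insert c w.toFinset := by
    ext d; simp [List.mem_toFinset]
  set B := insert c w.toFinset with hB
  set P : Char → Prop := fun d => count ≤ (w.count d : Int) with hP
  set P' : Char → Prop := fun d => count ≤ ((w ++ [c]).count d : Int) with hP'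
  have hF : w.toFinset.filter P = B.filter P := by
    ext d
    simp only [Finset.mem_filter, hB, Finset.mem_insert]
    constructor
    · rintro ⟨hd, hp⟩; exact ⟨Or.inr hd, hp⟩
    · rintro ⟨_, hp⟩; exact ⟨hsub d hp, hp⟩
  have hFt : (w ++ [c]).toFinset.filter P' = B.filter P' := by rw [hT]
  rw [hFt, hF]
  have herase : (B.filter P').erase c = (B.filter P).erase c := by
    ext d
    simp only [Finset.mem_erase, Finset.mem_filter]
    constructor <;> rintro ⟨hne, hmem, hp⟩ <;> refine ⟨hne, hmem, ?_⟩ <;>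
      · have hcd : List.count d [c] = 0 := List.count_eq_zero.mpr (by simp [hne])
        simp only [hP, hP', List.count_append, hcd] at hp ⊢
        push_cast at hp ⊢
        omega
  have hcB : c ∈ B := Finset.mem_insert_self c _
  have hmem' : c ∈ B.filter P' ↔ count ≤ (w.count c : Int) + 1 := by
    have hcc : List.count c [c] = 1 := by simp
    simp only [Finset.mem_filter, hP', List.count_append, hcc]
    push_cast
    constructor
    · rintro ⟨_, h⟩; omega
    · intro h; exact ⟨hcB, by omega⟩
  have hmem : c ∈ B.filter P ↔ count ≤ (w.count c : Int) := by
    simp only [Finset.mem_filter, hP]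
    exact ⟨fun h => h.2, fun h => ⟨hcB, h⟩⟩
  rw [card_split (B.filter P') c, card_split (B.filter P) c, herase]
  by_cases hcase : (w.count c : Int) + 1 = count
  · rw [if_pos hcase, if_pos (hmem'.mpr (by omega)), if_neg (by rw [hmem]; omega)]
  · rw [if_neg hcase]
    by_cases h2 : count ≤ (w.count c : Int)
    · rw [if_pos (hmem'.mpr (by omega)), if_pos (hmem.mpr h2)]
    · rw [if_neg (by rw [hmem']; omega), if_neg (by rw [hmem]; omega)]

lemma pvU_perm (count : Int) (w w' : List Char) (h : w.Perm w') : pvU count w = pvU count w' := by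
  unfold pvU
  rw [List.toFinset_eq_of_perm w w' h]
  congr 1
  apply Finset.filter_congr
  intro d _
  simp [h.count_eq]

lemma pvU_cons (count : Int) (hc : 1 ≤ count) (t : List Char) (c : Char) :
    pvU count (c :: t) = pvU count t + (if ((c :: t).count c : Int) = count then 1 else 0) := by
  have hp : (c :: t).Perm (t ++ [c]) := by
    simpa using (List.perm_append_singleton c t).symm
  rw [pvU_perm count _ _ hp, pvU_append count hc t c]
  have : (c :: t).count c = t.count c + 1 := by simp
  rw [this]
  push_cast
  congr 1

lemma pvWindowOK_iff (count i : Int) (w : List Char) :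
    pvWindowOK w count i = true ↔ ((w.toFinset.card : Int) = i ∧ ∀ c ∈ w, (w.count c : Int) = count) := by
  unfold pvWindowOK
  have hsize : (PySem.Dict.counter w).size = (PySem.Set.ofList w).length := by
    simp [PySem.Dict.size, PySem.Dict.items_counter]
  have hvals : (PySem.Dict.counter w).values = (PySem.Set.ofList w).map (fun k => (w.count k : Int)) := by
    simp [PySem.Dict.values, PySem.Dict.items_counter]
  have hcard : (PySem.Set.ofList w).length = w.toFinset.card := by
    have hnd : (PySem.Set.ofList w).Nodup := PySem.Set.nodup_ofList w
    have : (PySem.Set.ofList w).toFinset = w.toFinset := by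
      ext d; simp [List.mem_toFinset, PySem.Set.mem_ofList]
    rw [← this, List.toFinset_card_of_nodup hnd]
  simp only [hsize, hvals, hcard, Bool.and_eq_true, beq_iff_eq, List.all_eq_true, List.mem_map]
  constructor
  · rintro ⟨h1, h2⟩
    refine ⟨h1, fun c hcw => ?_⟩
    exact h2 _ ⟨c, (PySem.Set.mem_ofList w c).mpr hcw, rfl⟩
  · rintro ⟨h1, h2⟩
    refine ⟨h1, ?_⟩
    rintro v ⟨k, hk, rfl⟩
    exact h2 k ((PySem.Set.mem_ofList w k).mp hk)

lemma pvU_eq_iff (count i : Int) (hc : 1 ≤ count) (hi : 1 ≤ i) (w : List Char)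
    (hw : (w.length : Int) = i * count) :
    (pvU count w : Int) = i ↔ ((w.toFinset.card : Int) = i ∧ ∀ c ∈ w, (w.count c : Int) = count) := by
  classical
  unfold pvU
  set T := w.toFinset with hT
  set P : Char → Prop := fun c => count ≤ (w.count c : Int) with hP
  have hsum : ∑ c ∈ T, (w.count c : Int) = i * count := by
    rw [← hw]
    exact_mod_cast congrArg (Nat.cast : Nat → Int) (List.sum_toFinset_count_eq_length w)
  have hmemw : ∀ c ∈ T, 1 ≤ (w.count c : Int) := by
    intro c hcT
    have : c ∈ w := List.mem_toFinset.mp hcT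
    exact_mod_cast List.count_pos_iff.mpr this
  constructor
  · intro h
    have hsplit : (∑ c ∈ T.filter P, (w.count c : Int))
        + ∑ c ∈ T.filter (fun c => ¬ P c), (w.count c : Int) = i * count := by
      rw [Finset.sum_filter_add_sum_filter_not]; exact hsum
    have hlow : ((T.filter P).card : Int) * count ≤ ∑ c ∈ T.filter P, (w.count c : Int) := by
      have := Finset.card_nsmul_le_sum (T.filter P) (fun c => (w.count c : Int)) count
        (fun c hcF => (Finset.mem_filter.mp hcF).2)
      simpa [nsmul_eq_mul] using this
    have hlow2 : ((T.filter (fun c => ¬ P c)).card : Int)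
        ≤ ∑ c ∈ T.filter (fun c => ¬ P c), (w.count c : Int) := by
      have := Finset.card_nsmul_le_sum (T.filter (fun c => ¬ P c))
        (fun c => (w.count c : Int)) 1
        (fun c hcF => hmemw c (Finset.mem_filter.mp hcF).1)
      simpa [nsmul_eq_mul] using this
    have hker : (T.filter (fun c => ¬ P c)).card = 0 := by
      by_contra hne
      have h1 : 1 ≤ ((T.filter (fun c => ¬ P c)).card : Int) := by
        exact_mod_cast Nat.one_le_iff_ne_zero.mpr hne
      rw [h] at hlow
      omega
    have hall : ∀ c ∈ T, P c := by
      intro c hcT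
      by_contra hnp
      have : c ∈ T.filter (fun c => ¬ P c) := Finset.mem_filter.mpr ⟨hcT, hnp⟩
      have := Finset.card_pos.mpr ⟨c, this⟩
      omega
    have hTF : T.filter P = T := Finset.filter_true_of_mem hall
    rw [hTF] at h
    refine ⟨h, ?_⟩
    have hzero : ∑ c ∈ T, ((w.count c : Int) - count) = 0 := by
      rw [Finset.sum_sub_distrib, Finset.sum_const, hsum, nsmul_eq_mul, h]
      ring
    have heach := (Finset.sum_eq_zero_iff_of_nonneg
      (fun c hcT => by have := hall c hcT; simp only [hP] at this; omega)).mp hzero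
    intro c hcw
    have := heach c (List.mem_toFinset.mpr hcw)
    omega
  · rintro ⟨h1, h2⟩
    have : T.filter P = T := Finset.filter_true_of_mem (by
      intro c hcT
      have := h2 c (List.mem_toFinset.mp hcT)
      simp only [hP]; omega)
    rw [this]; exact h1

lemma pvA_nonpos (cs : List Char) (count i res : Int) (hc : count ≤ 0) (hi : 1 ≤ i) (m : Nat) :
    ∃ freq,
      (List.range m).foldl (pvStepA cs count i) (PySem.Dict.empty, 0, 0, res) = (freq, 0, m, res) ∧
      ∀ c, freq.getD c 0 = 0 := by
  induction m with
  | zero =>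
      exact ⟨PySem.Dict.empty, rfl, fun c => by simp [PySem.Dict.getD_empty]⟩
  | succ m ih =>
      obtain ⟨freq, hfold, hgetD⟩ := ih
      rw [List.range_succ, List.foldl_append, hfold]
      have hic : i * count ≤ 0 := mul_nonpos_of_nonneg_of_nonpos (by omega) hc
      set cr := cs.getD m ' ' with hcr
      refine ⟨(freq.modify cr 0 (· + 1)).modify cr 0 (· - 1), ?_, ?_⟩
      · have h1 : (freq.modify cr 0 (· + 1)).getD cr 0 = 1 := by
          rw [PySem.Dict.getD_modify_self, hgetD]; omega
        simp only [pvStepA, List.foldl_cons, List.foldl_nil, ← hcr, h1]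
        set L := i * count with hL
        split_ifs
        all_goals dsimp only at *
        all_goals first | rfl | (exfalso; omega)
      · intro c
        simp only [PySem.Dict.getD_modify]
        split_ifs <;> (try simp only [hgetD]) <;> omega

lemma pvA_inv (cs : List Char) (count i res : Int) (hc : 1 ≤ count) (hi : 1 ≤ i)
    (m : Nat) (hm : m ≤ cs.length) :
    ∃ freq,
      (List.range m).foldl (pvStepA cs count i) (PySem.Dict.empty, 0, 0, res)
        = (freq, (pvU count (pvWin cs (i * count).toNat m) : Int), m - (i * count).toNat,
           res + ((List.range m).countP (pvHit cs count i (i * count).toNat) : Int)) ∧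
      ∀ c, freq.getD c 0 = ((pvWin cs (i * count).toNat m).count c : Int) := by
  set Lt := (i * count).toNat with hLtdef
  have hLt : (Lt : Int) = i * count := Int.toNat_of_nonneg (by positivity)
  have h1ic : (1 : Int) ≤ i * count := by
    have := mul_le_mul hi hc (by omega) (by omega)
    simpa using this
  have hLt1 : 1 ≤ Lt := by omega
  induction m with
  | zero =>
      refine ⟨PySem.Dict.empty, ?_, ?_⟩
      · simp [pvWin, pvU]
      · intro c; simp [pvWin, PySem.Dict.getD_empty]
  | succ m ih =>
      have hm' : m < cs.length := hm
      obtain ⟨freq, hfold, hgetD⟩ := ih (Nat.le_of_lt hm')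
      rw [List.range_succ, List.foldl_append, hfold, List.foldl_cons, List.foldl_nil]
      set cr := cs.getD m ' ' with hcrdef
      set w := pvWin cs Lt m with hwdef
      set w' := pvWin cs Lt (m + 1) with hw'def
      -- the extended window
      have hcrget : cr = cs[m] := List.getD_eq_getElem cs ' ' hm'
      have hext : w ++ [cr] = (cs.take (m + 1)).drop (m - Lt) := by
        rw [hwdef, pvWin, List.take_add_one, List.getElem?_eq_getElem hm',
          List.drop_append_of_le_length (by simp; omega)]
        simp [hcrget]
      have hfreq1 : ∀ c, (freq.modify cr 0 (· + 1)).getD c 0 = (((w ++ [cr]).count c : Nat) : Int) := by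
        intro c
        simp only [PySem.Dict.getD_modify]
        split_ifs with h
        · subst h; rw [hgetD]; simp [List.count_append]
        · rw [hgetD]; simp [List.count_append, List.count_singleton]
          intro h'; exact absurd h'.symm h
      have hcnt : (((List.range m) ++ [m]).countP (pvHit cs count i Lt) : Int)
          = ((List.range m).countP (pvHit cs count i Lt) : Int)
            + (if Lt ≤ m + 1 ∧ (pvU count w' : Int) = i then 1 else 0) := by
        rw [List.countP_append]
        push_cast
        congr 1
        simp only [List.countP_cons, List.countP_nil, pvHit, ← hw'def]
        split_ifs with h <;> simp_all
      by_cases hml : m < Lt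
      · -- window not yet full: no shrink
        have hl0 : m - Lt = 0 := by omega
        have hl0' : m + 1 - Lt = 0 := by omega
        have hw'eq : w' = w ++ [cr] := by
          rw [hw'def, pvWin, hl0', hext, hl0]
        refine ⟨freq.modify cr 0 (· + 1), ?_, ?_⟩
        · simp only [pvStepA]
          rw [if_neg (by rw [hl0]; push_cast; omega)]
          dsimp only
          have huniq : (if (freq.modify cr 0 (· + 1)).getD cr 0 = count
              then ((pvU count w : Nat) : Int) + 1 else ((pvU count w : Nat) : Int))
              = ((pvU count w' : Nat) : Int) := by
            rw [hfreq1 cr, hw'eq, pvU_append count hc w cr]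
            have hplus : (List.count cr (w ++ [cr]) : Int) = (List.count cr w : Int) + 1 := by
              push_cast [List.count_append]; simp
            push_cast at hplus ⊢
            split_ifs <;> omega
          rw [huniq, hcnt]
          have hiff : (((m : Nat) : Int) - ((m - Lt : Nat) : Int) + 1 = i * count ∧ ((pvU count w' : Nat) : Int) = i)
              ↔ (Lt ≤ m + 1 ∧ ((pvU count w' : Nat) : Int) = i) := by
            rw [hl0]
            constructor <;> rintro ⟨h1, h2⟩ <;> exact ⟨by push_cast at h1 ⊢; omega, h2⟩
          rw [if_congr hiff rfl rfl]
          split_ifs <;> simp [hl0, hl0', hcrdef, List.getD] <;> try ring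
        · intro c; rw [hfreq1 c, hw'eq]
      · -- full window: shrink from the left
        have hLm : Lt ≤ m := Nat.le_of_not_lt hml
        have hsub : m + 1 - Lt = (m - Lt) + 1 := by omega
        set cl := cs.getD (m - Lt) ' ' with hcldef
        have hcons : w ++ [cr] = cl :: w' := by
          rw [hext, hw'def, pvWin, hsub]
          rw [List.drop_eq_getElem_cons (by simp; omega)]
          congr 1
          rw [List.getElem_take]
          rw [hcldef, List.getD_eq_getElem cs ' ' (by omega)]
        refine ⟨(freq.modify cr 0 (· + 1)).modify cl 0 (· - 1), ?_, ?_⟩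
        · simp only [pvStepA]
          rw [if_pos (by push_cast; omega)]
          dsimp only
          have huniq : (if (freq.modify cr 0 (· + 1)).getD cr 0 = count
              then ((pvU count w : Nat) : Int) + 1 else ((pvU count w : Nat) : Int))
              = ((pvU count (w ++ [cr]) : Nat) : Int) := by
            rw [hfreq1 cr, pvU_append count hc w cr]
            have hplus : (List.count cr (w ++ [cr]) : Int) = (List.count cr w : Int) + 1 := by
              push_cast [List.count_append]; simp
            push_cast at hplus ⊢
            split_ifs <;> omega
          rw [huniq]
          have huniq2 : (if (freq.modify cr 0 (· + 1)).getD cl 0 = count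
              then ((pvU count (w ++ [cr]) : Nat) : Int) - 1 else ((pvU count (w ++ [cr]) : Nat) : Int))
              = ((pvU count w' : Nat) : Int) := by
            rw [hfreq1 cl, hcons, pvU_cons count hc w' cl]
            push_cast
            split_ifs <;> omega
          rw [huniq2, hcnt]
          have hiff : (((m : Nat) : Int) - (((m - Lt : Nat) + 1 : Nat) : Int) + 1 = i * count ∧ ((pvU count w' : Nat) : Int) = i)
              ↔ (Lt ≤ m + 1 ∧ ((pvU count w' : Nat) : Int) = i) := by
            constructor <;> rintro ⟨h1, h2⟩ <;> exact ⟨by push_cast at h1 ⊢; omega, h2⟩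
          rw [if_congr hiff rfl rfl]
          split_ifs <;> simp [hsub, hcrdef, hcldef, List.getD] <;> try ring
        · intro c
          rw [PySem.Dict.getD_modify]
          split_ifs with h
          · subst h
            rw [hfreq1 cl, hcons]
            simp [List.count_cons]
          · rw [hfreq1 c, hcons]
            simp [List.count_cons]
            intro h'; exact absurd h'.symm h

lemma pvInner (cs : List Char) (count i res : Int) (hi : 1 ≤ i) :
    ((List.range cs.length).foldl (pvStepA cs count i) (PySem.Dict.empty, 0, 0, res)).2.2.2
      = pvStepB cs count res i := by
  by_cases hc : count ≤ 0
  · obtain ⟨freq, hfold, -⟩ := pvA_nonpos cs count i res hc hi cs.length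
    rw [hfold]
    unfold pvStepB
    rw [if_pos (Or.inl (by nlinarith))]
  · push_neg at hc
    have hc1 : 1 ≤ count := hc
    obtain ⟨freq, hfold, -⟩ := pvA_inv cs count i res hc1 hi cs.length le_rfl
    rw [hfold]
    have h1ic : (1 : Int) ≤ i * count := by
      have := mul_le_mul hi hc1 (by omega) (by omega)
      simpa using this
    set Lt := (i * count).toNat with hLtdef
    have hLt : (Lt : Int) = i * count := Int.toNat_of_nonneg (by omega)
    have hLt1 : 1 ≤ Lt := by omega
    unfold pvStepB
    by_cases hbig : (cs.length : Int) < i * count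
    · rw [if_pos (Or.inr hbig)]
      have hzero : (List.range cs.length).countP (pvHit cs count i Lt) = 0 := by
        rw [List.countP_eq_zero]
        intro r hr
        simp only [List.mem_range] at hr
        simp only [pvHit, Bool.and_eq_true, decide_eq_true_eq, not_and]
        intro h1 _
        omega
      simp [hzero]
    · rw [if_neg (by push_neg; exact ⟨by omega, by omega⟩)]
      have hLn : Lt ≤ cs.length := by omega
      rw [PySem.List.foldl_count_if]
      dsimp only
      congr 1
      simp only [bind_pure_comp, List.map_eq_map]
      rw [List.countP_map, Nat.cast_inj]
      have hn : cs.length = (Lt - 1) + (cs.length - Lt + 1) := by omega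
      have hfirst : (List.range (Lt - 1)).countP (pvHit cs count i Lt) = 0 := by
        rw [List.countP_eq_zero]
        intro r hr
        simp only [List.mem_range] at hr
        simp only [pvHit, Bool.and_eq_true, decide_eq_true_eq, not_and]
        intro h1 _
        omega
      conv_lhs => rw [hn, List.range_add]
      rw [List.countP_append, List.countP_map, hfirst, Nat.zero_add]
      apply List.countP_congr
      intro start hstart
      simp only [List.mem_range] at hstart
      simp only [Function.comp]
      have harg : Lt - 1 + start + 1 = start + Lt := by omega
      have hwin : pvWin cs Lt (start + Lt) = (cs.drop start).take Lt := by
        unfold pvWin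
        have h1 : start + Lt - Lt = start := by omega
        rw [h1, List.drop_take]
        congr 1
        omega
      have hslice : PySem.List.slice cs (some ((start : Nat) : Int)) (some (((start : Nat) : Int) + i * count))
          = (cs.drop start).take Lt := by
        rw [← hLt, PySem.List.slice_natCast_add]
      have hlen : (((cs.drop start).take Lt).length : Int) = i * count := by
        rw [← hLt]
        simp
        omega
      have hgood : ((pvU count ((cs.drop start).take Lt) : Nat) : Int) = i
          ↔ pvWindowOK ((cs.drop start).take Lt) count i = true := by
        rw [pvU_eq_iff count i hc1 hi _ hlen, pvWindowOK_iff count i]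
      simp only [pvHit, harg, hwin, hslice, Bool.and_eq_true, decide_eq_true_eq]
      constructor
      · rintro ⟨-, h2⟩
        exact hgood.mp h2
      · intro h
        exact ⟨by omega, hgood.mpr h⟩

lemma pvFoldConst (l : List Int) (a : Int) : l.foldl (fun acc _ => acc) a = a := by
  induction l generalizing a with
  | nil => rfl
  | cons x t ih => simpa using ih a

-- ===== VERDICT (by name: the statement is the Claim_ definition above) =====
theorem equalCountSubstrings_spec : Claim_equal_equalCountSubstrings := by
  intro s count _
  unfold Spec_equalCountSubstrings equalCountSubstrings equalCountSubstrings_alt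
  set cs := s.toList with hcs
  by_cases hlt : ((cs.length : Nat) : Int) < count
  · rw [if_pos hlt]
    have hstep : ∀ (res : Int), ∀ x ∈ PySem.List.pyRange 1 27 1,
        pvStepB cs count res x = (fun (acc : Int) (_ : Int) => acc) res x := by
      intro res x hx
      have hx1 : 1 ≤ x ∧ x < 27 := PySem.List.mem_pyRange_one.mp hx
      unfold pvStepB
      rw [if_pos]
      right
      calc ((cs.length : Nat) : Int) < count := hlt
        _ = 1 * count := (one_mul count).symm
        _ ≤ x * count := by
            apply mul_le_mul_of_nonneg_right hx1.1
            omega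
    rw [PySem.List.foldl_congr_mem _ _ _ _ hstep, pvFoldConst]
  · rw [if_neg hlt]
    apply PySem.List.foldl_congr_mem
    intro acc x hx
    have hx1 : 1 ≤ x ∧ x < 27 := PySem.List.mem_pyRange_one.mp hx
    exact pvInner cs count x acc hx1.1
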